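-- pv_equiv track=rewrite | github.com/qifanyyy/JupyterNotebook | new_algs/Number theoretic algorithms/Shor's+algorithm/ExperimentUtils.py | get_backend_dict
-- ===== SOURCE A (Python) =====
-- def get_backend_dict(backends):
--     dict = {}
--     i = 1
--     # ensure simulators are at top of list
--     for b in backends:
--         if "simulator" in b:
--             dict[i] = b
--             i += 1
--     for b in backends:
--         if "simulator" not in b:
--             dict[i] = b
--             i += 1
--     return dict
-- ===== SOURCE B (Python) =====
-- def get_backend_dict(backends):
--     ordered = sorted(backends, key=lambda b: "simulator" not in b)
--     return {i: b for i, b in enumerate(ordered, 1)}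
-- ===== Notes on version B (the rewrite author's own statement) =====
-- stated objective: idiomatic
-- what changed: A's two conditional scans (simulators first, then the rest) are replaced by one stable sort on the boolean key '"simulator" not in b' followed by a single enumerate pass assigning keys 1..n.
import Mathlib
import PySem

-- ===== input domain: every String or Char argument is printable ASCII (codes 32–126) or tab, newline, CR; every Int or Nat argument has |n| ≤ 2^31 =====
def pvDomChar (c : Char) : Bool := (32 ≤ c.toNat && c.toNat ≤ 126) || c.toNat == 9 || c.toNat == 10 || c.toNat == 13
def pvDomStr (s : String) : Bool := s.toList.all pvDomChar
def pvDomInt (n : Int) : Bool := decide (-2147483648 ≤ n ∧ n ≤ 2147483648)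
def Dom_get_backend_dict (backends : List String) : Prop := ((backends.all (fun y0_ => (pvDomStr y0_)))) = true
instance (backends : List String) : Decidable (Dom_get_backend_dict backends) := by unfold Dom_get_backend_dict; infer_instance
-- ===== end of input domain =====

-- ===== PORT A =====
-- B replaces A's two conditional scans by one stable sort on the boolean key plus an enumerate pass (return value only; same behaviour).
def get_backend_dict (backends : List String) : List (Int × String) :=
  (backends.foldl
    (fun (st : PySem.Dict Int String × Int) b =>
      if PySem.Str.isIn "simulator" b then st else (st.1.insert st.2 b, st.2 + 1))
    (backends.foldl
      (fun (st : PySem.Dict Int String × Int) b =>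
        if PySem.Str.isIn "simulator" b then (st.1.insert st.2 b, st.2 + 1) else st)
      (PySem.Dict.empty, 1))).1.items

-- ===== PORT B =====
def get_backend_dict_alt (backends : List String) : List (Int × String) :=
  let ordered := PySem.List.sorted backends (fun b => !(PySem.Str.isIn "simulator" b))
  ((PySem.List.enumerate ordered 1).foldl
    (fun (d : PySem.Dict Int String) p => d.insert p.1 p.2) PySem.Dict.empty).items

-- ===== PRECONDITION & SPEC =====
def Spec_get_backend_dict (backends : List String) (out : List (Int × String)) : Prop := out = get_backend_dict_alt backends
instance (backends : List String) (out : List (Int × String)) : Decidable (Spec_get_backend_dict backends out) := by unfold Spec_get_backend_dict; infer_instance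

-- ===== CLAIM (what is proved, stated in full; the proofs are below) =====
def Claim_equal_get_backend_dict : Prop := ∀ (backends : List String), Dom_get_backend_dict backends → Spec_get_backend_dict backends (get_backend_dict backends)

-- ===== LEMMAS AND PROOFS =====

-- A's insertion loop over a fresh increasing counter appends enumerated filtered elements.
theorem foldA_invariant (q : String → Bool) (xs : List String) (L : List (Int × String)) (i : Int)
    (h : ∀ p ∈ L, p.1 < i) :
    xs.foldl (fun (st : PySem.Dict Int String × Int) b =>
        if q b then (st.1.insert st.2 b, st.2 + 1) else st) (PySem.Dict.mk L, i)
      = (PySem.Dict.mk (L ++ PySem.List.enumerate (xs.filter q) i), i + (xs.countP q : Int)) := by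
  induction xs generalizing L i with
  | nil => simp
  | cons x t ih =>
    rw [List.foldl_cons]
    by_cases hx : q x = true
    · have hc : (PySem.Dict.mk L).contains i = false := by
        rw [PySem.Dict.contains_eq_decide_mem_keys]
        simp only [PySem.Dict.keys_mk, decide_eq_false_iff_not, List.mem_map]
        rintro ⟨p, hp, rfl⟩
        exact absurd (h p hp) (lt_irrefl _)
      have hins : (PySem.Dict.mk L).insert i x = PySem.Dict.mk (L ++ [(i, x)]) := by
        apply PySem.Dict.ext
        rw [PySem.Dict.items_insert_of_not_contains _ _ hc]
      rw [if_pos hx, hins,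
        ih (L ++ [(i, x)]) (i + 1) (by
          intro p hp
          rcases List.mem_append.mp hp with h1 | h1
          · exact lt_trans (h p h1) (by omega)
          · simp only [List.mem_singleton] at h1; subst h1; exact lt_add_one i)]
      simp only [List.filter_cons, hx, if_true, List.countP_cons,
        PySem.List.enumerate_cons, Prod.mk.injEq]
      refine ⟨by simp, by push_cast; omega⟩
    · have hx' : q x = false := by simp_all
      rw [if_neg (by simp [hx']), ih L i h]
      simp [hx']

-- Inserting into a partitioned list (simulators, then non-simulators) keeps the partition, stably.
theorem insertBy_part (p : String → Bool) (x : String) (fs ts : List String)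
    (hfs : ∀ y ∈ fs, p y = true) (hts : ∀ y ∈ ts, p y = false) :
    PySem.List.insertBy (fun a b => decide ((!p a) < (!p b))) x (fs ++ ts)
      = if p x then (fs ++ [x]) ++ ts else fs ++ (ts ++ [x]) := by
  by_cases hx : p x = true
  · rw [if_pos hx]
    induction fs with
    | nil =>
      cases ts with
      | nil => simp [PySem.List.insertBy]
      | cons z ts' =>
        have hz := hts z (by simp)
        simp [PySem.List.insertBy, hx, hz]
    | cons f fs' ihf =>
      have hf := hfs f (by simp)
      simp only [List.cons_append, PySem.List.insertBy, hx, hf]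
      rw [if_neg (by simp)]
      rw [ihf (fun y hy => hfs y (by simp [hy]))]
  · have hx' : p x = false := by simp_all
    rw [if_neg hx]
    rw [PySem.List.insertBy_of_forall_not_before _ _ _ (fun y _ => by simp [hx'])]
    simp

-- The whole insertion sort with the boolean key is the stable partition.
theorem foldB_invariant (p : String → Bool) (xs fs ts : List String)
    (hfs : ∀ y ∈ fs, p y = true) (hts : ∀ y ∈ ts, p y = false) :
    xs.foldl (fun acc x => PySem.List.insertBy (fun a b => decide ((!p a) < (!p b))) x acc) (fs ++ ts)
      = (fs ++ xs.filter p) ++ (ts ++ xs.filter (fun b => !p b)) := by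
  induction xs generalizing fs ts with
  | nil => simp
  | cons x t ih =>
    rw [List.foldl_cons, insertBy_part p x fs ts hfs hts]
    by_cases hx : p x = true
    · rw [if_pos hx,
        ih (fs ++ [x]) ts (by
          intro y hy
          rcases List.mem_append.mp hy with h1 | h1
          · exact hfs y h1
          · simp at h1; subst h1; exact hx) hts]
      simp [hx]
    · have hx' : p x = false := by simp_all
      rw [if_neg hx,
        ih fs (ts ++ [x]) hfs (by
          intro y hy
          rcases List.mem_append.mp hy with h1 | h1
          · exact hts y h1
          · simp at h1; subst h1; exact hx')]
      simp [hx']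

theorem sorted_bool_key (p : String → Bool) (xs : List String) :
    PySem.List.sorted xs (fun b => !p b)
      = xs.filter p ++ xs.filter (fun b => !p b) := by
  rw [PySem.List.sorted_eq_foldl_insertBy]
  simpa using foldB_invariant p xs [] [] (by simp) (by simp)

-- B's dict comprehension over enumerate(ordered, 1) has fresh distinct keys, so its items are the enumerated list.
theorem alt_items (xs : List String) :
    get_backend_dict_alt xs
      = PySem.List.enumerate (PySem.List.sorted xs (fun b => !(PySem.Str.isIn "simulator" b))) 1 := by
  unfold get_backend_dict_alt
  rw [PySem.Dict.items_foldl_insert_fresh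
        (PySem.List.enumerate (PySem.List.sorted xs (fun b => !(PySem.Str.isIn "simulator" b))) 1)
        (fun p => p.1) (fun p => p.2) PySem.Dict.empty
        (fun a _ => PySem.Dict.contains_empty _)
        (by
          have hpl := PySem.List.pairwise_lt_enumerate
            (PySem.List.sorted xs (fun b => !(PySem.Str.isIn "simulator" b))) 1
          rw [List.Nodup, List.pairwise_map]
          exact hpl.imp (fun h => ne_of_lt h))]
  simp [PySem.Dict.empty]

-- ===== VERDICT (by name: the statement is the Claim_ definition above) =====
theorem get_backend_dict_spec : Claim_equal_get_backend_dict := by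
  intro backends _
  unfold Spec_get_backend_dict
  unfold get_backend_dict
  have hswap :
      (fun (st : PySem.Dict Int String × Int) b =>
          if PySem.Str.isIn "simulator" b then st else (st.1.insert st.2 b, st.2 + 1))
        = (fun (st : PySem.Dict Int String × Int) b =>
          if (!PySem.Str.isIn "simulator" b) then (st.1.insert st.2 b, st.2 + 1) else st) := by
    funext st b
    cases PySem.Str.isIn "simulator" b <;> rfl
  rw [show (PySem.Dict.empty : PySem.Dict Int String) = PySem.Dict.mk [] from rfl,
    foldA_invariant _ backends [] 1 (by simp), hswap,
    foldA_invariant _ backends _ _ (by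
      intro p hp
      rcases (PySem.List.mem_enumerate_iff _ _ _).mp hp with ⟨k, hk, rfl⟩
      rw [List.countP_eq_length_filter]
      show (1 : Int) + k < 1 + _
      omega)]
  rw [alt_items, sorted_bool_key (fun b => PySem.Str.isIn "simulator" b) backends]
  rw [PySem.List.enumerate_append]
  rw [List.countP_eq_length_filter]
  simp only [List.nil_append]
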